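-- pv_equiv track=rewrite | github.com/swdevsw98/programers_python | 자료구조/기능개발.py | solution
-- ===== SOURCE A (Python) =====
-- def solution(progresses, speeds):
--     answer = []
--     queue = []
--
--     for i in range(len(progresses)):
--         count = 0
--         while progresses[i] < 100 :
--             count += 1
--             progresses[i] += speeds[i]
--         queue.append(count)
--
--     cnt = 1
--     tmpMax = queue[0]
--     for idx, i in enumerate(queue):
--         if idx == 0:
--             continue
--         if tmpMax < i :
--             tmpMax = i
--             answer.append(cnt)
--             cnt = 0
--         if idx == len(queue) - 1:
--             cnt += 1
--             answer.append(cnt)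
--         cnt += 1
--
--
--     return answer
-- ===== SOURCE B (Python) =====
-- def solution(progresses, speeds):
--     # days per task via ceiling division (closed form, no while loop)
--     days = []
--     for p, s in zip(progresses, speeds):
--         need = 100 - p
--         days.append(0 if need <= 0 else -(-need // s))
--     # run-length encode the running maximum of days
--     answer = []
--     cur = days[0]
--     run = 1
--     for d in days[1:]:
--         if cur < d:
--             answer.append(run)
--             cur = d
--             run = 1
--         else:
--             run += 1
--     answer.append(run)
--     return answer
-- ===== Notes on version B (the rewrite author's own statement) =====
-- stated objective: simpler
-- what changed: Replaces the per-task while-loop with a closed-form ceiling division and replaces the index/enumerate grouping loop (with its idx==0 skip and idx==last special case) by a plain running-maximum run-length encoding that appends the final run once after the loop; B does not mutate progresses (A does).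
-- intended difference: On single-task input (len(progresses)==1) A returns [] because its grouping loop skips index 0 and never reaches its last-index branch, while B returns [1], the intended one-group-of-one answer. — e.g. on solution([50], [50]): A returns [], B returns [1]
-- outside the precondition, e.g. on solution([6904, 0, 2, 3, 100], [-3, 20, 10, 2]): A returns [1, 1, 1, 2], B returns [1, 1, 1, 1]
import Mathlib
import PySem

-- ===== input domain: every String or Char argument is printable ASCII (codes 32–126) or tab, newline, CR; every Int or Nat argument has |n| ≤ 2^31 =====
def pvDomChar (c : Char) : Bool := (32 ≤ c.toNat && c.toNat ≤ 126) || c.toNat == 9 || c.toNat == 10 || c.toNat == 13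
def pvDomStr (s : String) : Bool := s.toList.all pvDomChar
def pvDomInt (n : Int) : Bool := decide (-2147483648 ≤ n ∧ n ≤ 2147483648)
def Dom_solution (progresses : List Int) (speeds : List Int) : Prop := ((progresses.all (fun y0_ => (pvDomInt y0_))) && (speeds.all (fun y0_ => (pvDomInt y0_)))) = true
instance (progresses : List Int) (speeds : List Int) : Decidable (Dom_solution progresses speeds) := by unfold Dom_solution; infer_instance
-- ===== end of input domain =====

-- B replaces A's per-task while-loop by ceiling division and A's enumerate-index grouping
-- loop by a running-maximum run-length encoding (objective: simpler). A mutates `progresses`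
-- in place, B does not; the equivalence proved here is about the return value only.

-- ===== PORT A =====
-- the while loop `while progresses[i] < 100: count += 1; progresses[i] += speeds[i]`;
-- fuel (100-p).toNat bounds the iteration count whenever speeds[i] ≥ 1 (Pre_), so the
-- fuel guard only makes the recursion total and never fires inside Pre_
def solGoA : Nat → Int → Int → Int → Int
  | 0, _, _, count => count
  | f + 1, p, s, count => if p < 100 then solGoA f (p + s) s (count + 1) else count

def solCountA (p s : Int) : Int := solGoA (100 - p).toNat p s 0

-- body of `for idx, i in enumerate(queue)` (n = len(queue)); state (answer, cnt, tmpMax)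
def solStepA (n : Int) (st : List Int × Int × Int) (pr : Int × Int) : List Int × Int × Int :=
  if pr.1 = 0 then st
  else
    let s1 := if st.2.2 < pr.2 then (st.1 ++ [st.2.1], (0 : Int), pr.2) else st
    let s2 := if pr.1 = n - 1 then (s1.1 ++ [s1.2.1 + 1], s1.2.1 + 1, s1.2.2) else s1
    (s2.1, s2.2.1 + 1, s2.2.2)

def solution (progresses : List Int) (speeds : List Int) : List Int :=
  let queue := (List.range progresses.length).foldl
    (fun q i => q ++ [solCountA (progresses.getD i 0) (speeds.getD i 0)]) []
  ((PySem.List.enumerate queue 0).foldl (solStepA (queue.length : Int))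
    ([], 1, queue.headD 0)).1

-- ===== PORT B =====
-- days per task: 0 if already done, else ceil((100-p)/s) written as -(-need // s)
def solDayB (p s : Int) : Int :=
  if 100 - p ≤ 0 then 0 else -(PySem.Int.floordiv (-(100 - p)) s)

-- body of the RLE loop; state (answer, cur, run)
def solStepB (st : List Int × Int × Int) (d : Int) : List Int × Int × Int :=
  if st.2.1 < d then (st.1 ++ [st.2.2], d, 1) else (st.1, st.2.1, st.2.2 + 1)

def solution_alt (progresses : List Int) (speeds : List Int) : List Int :=
  let days := (List.zip progresses speeds).map (fun pr => solDayB pr.1 pr.2)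
  let st := (days.drop 1).foldl solStepB ([], days.headD 0, 1)
  st.1 ++ [st.2.2]

-- ===== PRECONDITION & SPEC =====
-- Pre_ excludes: empty progresses (queue[0] raises IndexError), a non-positive speed for
-- an unfinished task (the while loop never terminates), and speeds shorter than progresses
-- — there A raises IndexError unless every task beyond len(speeds) happens to start at
-- ≥ 100 (then A returns a row of accidental zero-day tasks B's pairwise zip does not pair).
def Pre_solution (progresses : List Int) (speeds : List Int) : Prop :=
  progresses ≠ [] ∧ progresses.length ≤ speeds.length ∧
    ∀ pr ∈ List.zip progresses speeds, pr.1 < 100 → 0 < pr.2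
instance (progresses : List Int) (speeds : List Int) : Decidable (Pre_solution progresses speeds) := by unfold Pre_solution; infer_instance

def pvWitness_solution : List Int × List Int := ([93, 30, 55], [1, 30, 5])

-- On single-task input (length 1) A returns [] because its grouping loop skips index 0
-- and never reaches its last-index branch, while B returns [1], the intended answer.
def D_solution (progresses : List Int) (speeds : List Int) : Prop :=
  progresses.length = 1
instance (progresses : List Int) (speeds : List Int) : Decidable (D_solution progresses speeds) := by unfold D_solution; infer_instance

def Spec_solution (progresses : List Int) (speeds : List Int) (out : List Int) : Prop :=
  ¬ D_solution progresses speeds → out = solution_alt progresses speeds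
instance (progresses : List Int) (speeds : List Int) (out : List Int) : Decidable (Spec_solution progresses speeds out) := by unfold Spec_solution; infer_instance

def pvDiffWitness_solution : List Int × List Int := ([50], [50])
def pvDiffWitnessOut_solution : (List Int) × (List Int) := ([], [1])

-- ===== CLAIM (what is proved, stated in full; the proofs are below) =====
def Claim_unchanged_solution : Prop := ∀ (progresses : List Int) (speeds : List Int), Dom_solution progresses speeds → Pre_solution progresses speeds → Spec_solution progresses speeds (solution progresses speeds)
def Claim_changed_solution : Prop := Dom_solution (pvDiffWitness_solution.1) (pvDiffWitness_solution.2) ∧ Pre_solution (pvDiffWitness_solution.1) (pvDiffWitness_solution.2) ∧ D_solution (pvDiffWitness_solution.1) (pvDiffWitness_solution.2) ∧ solution (pvDiffWitness_solution.1) (pvDiffWitness_solution.2) = pvDiffWitnessOut_solution.1 ∧ solution_alt (pvDiffWitness_solution.1) (pvDiffWitness_solution.2) = pvDiffWitnessOut_solution.2 ∧ pvDiffWitnessOut_solution.1 ≠ pvDiffWitnessOut_solution.2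
def Claim_exact_solution : Prop := ∀ (progresses : List Int) (speeds : List Int), Dom_solution progresses speeds → Pre_solution progresses speeds → D_solution progresses speeds → solution progresses speeds ≠ solution_alt progresses speeds

-- ===== LEMMAS AND PROOFS =====

-- the while-count equals the ceiling-division day count when the speed is positive
theorem solGoA_eq (s : Int) (hs : 0 < s) :
    ∀ (f : Nat) (p count : Int), (100 - p).toNat ≤ f → solGoA f p s count = count + solDayB p s := by
  intro f
  induction f with
  | zero =>
      intro p count hp
      have : (100 : Int) - p ≤ 0 := by omega
      simp [solGoA, solDayB, this]
  | succ f ih =>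
      intro p count hp
      by_cases h : p < 100
      · have hf : (100 - (p + s)).toNat ≤ f := by omega
        have := ih (p + s) (count + 1) hf
        rw [solGoA, if_pos h, this]
        -- arithmetic step: solDayB (p+s) s + 1 = solDayB p s, then regroup
        have ha : (0 : Int) < 100 - p := by omega
        have hch : (-PySem.Int.floordiv (-(100 - p)) s - 1) * s < 100 - p ∧
            100 - p ≤ -PySem.Int.floordiv (-(100 - p)) s * s :=
          (PySem.Int.neg_floordiv_neg_eq_iff_of_pos hs).mp rfl
        have haux : solDayB (p + s) s + 1 = solDayB p s := by
          by_cases h2 : 100 - (p + s) ≤ 0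
          · have h1 : -PySem.Int.floordiv (-(100 - p)) s = 1 :=
              (PySem.Int.neg_floordiv_neg_eq_iff_of_pos hs).mpr ⟨by nlinarith, by omega⟩
            unfold solDayB
            rw [if_pos h2, if_neg (by omega : ¬ ((100 : Int) - p ≤ 0)), h1]
            norm_num
          · set q := -PySem.Int.floordiv (-(100 - p)) s with hq
            have h1 : -PySem.Int.floordiv (-(100 - (p + s))) s = q - 1 := by
              apply (PySem.Int.neg_floordiv_neg_eq_iff_of_pos hs).mpr
              constructor
              · have : (q - 1 - 1) * s = (q - 1) * s - s := by ring
                rw [this]; omega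
              · have : (q - 1) * s = q * s - s := by ring
                rw [this]; omega
            unfold solDayB
            rw [if_neg h2, if_neg (by omega : ¬ ((100 : Int) - p ≤ 0)), h1]
            omega
        omega
      · simp [solGoA, h, solDayB]

theorem solCountA_eq (p s : Int) (h : p < 100 → 0 < s) : solCountA p s = solDayB p s := by
  by_cases hp : p < 100
  · have := solGoA_eq s (h hp) _ p 0 le_rfl
    unfold solCountA
    omega
  · have h1 : (100 : Int) - p ≤ 0 := by omega
    have : ((100 : Int) - p).toNat = 0 := by omega
    simp [solCountA, this, solGoA, solDayB, h1]

-- A's first loop builds exactly B's days list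
theorem foldl_range_append (f : Nat → Int) (n : Nat) :
    ∀ acc : List Int, (List.range n).foldl (fun q i => q ++ [f i]) acc = acc ++ (List.range n).map f := by
  induction n with
  | zero => intro acc; simp
  | succ n ih =>
      intro acc
      rw [List.range_succ, List.foldl_append, ih, List.map_append]
      simp

theorem queue_eq_days (progresses speeds : List Int)
    (hlen : progresses.length ≤ speeds.length)
    (hpos : ∀ pr ∈ List.zip progresses speeds, pr.1 < 100 → 0 < pr.2) :
    (List.range progresses.length).foldl
      (fun q i => q ++ [solCountA (progresses.getD i 0) (speeds.getD i 0)]) []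
    = (List.zip progresses speeds).map (fun pr => solDayB pr.1 pr.2) := by
  rw [foldl_range_append, List.nil_append]
  apply List.ext_getElem
  · simp [List.length_zip]; omega
  · intro i h1 h2
    have hi : i < progresses.length := by simpa using h1
    have hiz : i < (List.zip progresses speeds).length := by simp [List.length_zip]; omega
    have hmem : (List.zip progresses speeds)[i] ∈ List.zip progresses speeds :=
      List.getElem_mem hiz
    have hz : (List.zip progresses speeds)[i] = (progresses[i], speeds[i]'(by omega)) := by
      simp [List.getElem_zip]
    simp only [List.getElem_map, List.getElem_range]
    rw [List.getD_eq_getElem _ _ hi, List.getD_eq_getElem _ _ (by omega : i < speeds.length), hz]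
    exact solCountA_eq _ _ (by
      intro hlt
      have := hpos _ hmem
      rw [hz] at this
      exact this hlt)

-- the grouping loops agree on any suffix that excludes index 0 and is nonempty
theorem loop_eq (n : Int) :
    ∀ (l : List Int) (k : Int) (ans : List Int) (cnt mx : Int),
      l ≠ [] → 1 ≤ k → k + l.length = n →
      ((PySem.List.enumerate l k).foldl (solStepA n) (ans, cnt, mx)).1
        = (let st := l.foldl solStepB (ans, mx, cnt); st.1 ++ [st.2.2]) := by
  intro l
  induction l with
  | nil => intro k ans cnt mx h; exact absurd rfl h
  | cons d tl ih =>
      intro k ans cnt mx _ hk hn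
      cases tl with
      | nil =>
          have hn' : k + (1 : Int) = n := by simpa using hn
          have hlast : k = n - 1 := by omega
          have h0 : ¬ ((n : Int) - 1 = 0) := by omega
          by_cases hmx : mx < d
          · simp [PySem.List.enumerate, solStepA, solStepB, h0, hlast, hmx]
          · simp [PySem.List.enumerate, solStepA, solStepB, h0, hlast, hmx]
      | cons e tl' =>
          have hk0 : ¬ (k = 0) := by omega
          have hnl : ¬ (k = n - 1) := by simp at hn; omega
          have hrec : (k + 1) + (e :: tl').length = n := by simp at hn ⊢; omega
          by_cases hmx : mx < d
          · rw [PySem.List.enumerate_cons, List.foldl_cons]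
            rw [show solStepA n (ans, cnt, mx) (k, d) = (ans ++ [cnt], 1, d) by
              simp [solStepA, hk0, hnl, hmx]]
            rw [ih (k + 1) (ans ++ [cnt]) 1 d (by simp) (by omega) hrec]
            simp [solStepB, hmx]
          · rw [PySem.List.enumerate_cons, List.foldl_cons]
            rw [show solStepA n (ans, cnt, mx) (k, d) = (ans, cnt + 1, mx) by
              simp [solStepA, hk0, hnl, hmx]]
            rw [ih (k + 1) ans (cnt + 1) mx (by simp) (by omega) hrec]
            simp [solStepB, hmx]

-- ===== VERDICT (by name: the statement is the Claim_ definition above) =====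
theorem solution_spec : Claim_unchanged_solution := by
  intro progresses speeds _ hpre hD
  obtain ⟨hne, hlen, hpos⟩ := hpre
  show solution progresses speeds = solution_alt progresses speeds
  unfold solution solution_alt
  dsimp only
  rw [queue_eq_days progresses speeds hlen hpos]
  have hlz : ((List.zip progresses speeds).map (fun pr => solDayB pr.1 pr.2)).length = progresses.length := by
    simp [List.length_zip]; omega
  have h2 : 2 ≤ ((List.zip progresses speeds).map (fun pr => solDayB pr.1 pr.2)).length := by
    rw [hlz]
    have h1 : progresses.length ≠ 1 := fun h => hD h
    rcases progresses with _ | ⟨a, tl⟩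
    · exact absurd rfl hne
    · simp only [List.length_cons] at h1 ⊢; omega
  rcases e : (List.zip progresses speeds).map (fun pr => solDayB pr.1 pr.2) with _ | ⟨q0, _ | ⟨q1, rest⟩⟩
  · rw [e] at h2; simp at h2
  · rw [e] at h2; simp at h2
  · rw [e]
    rw [PySem.List.enumerate_cons, List.foldl_cons]
    rw [show solStepA (((q0 :: q1 :: rest).length : Nat) : Int) (([] : List Int), (1 : Int), (q0 :: q1 :: rest).headD 0) (0, q0) = ([], 1, q0) from by
      simp [solStepA]]
    rw [loop_eq (((q0 :: q1 :: rest).length : Nat) : Int) (q1 :: rest) (0 + 1) [] 1 q0 (by simp) (by norm_num) (by simp; omega)]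
    simp

theorem solution_changed : Claim_changed_solution := by
  unfold Claim_changed_solution; decide

theorem solution_tight : Claim_exact_solution := by
  intro progresses speeds _ hpre hD
  obtain ⟨_, hlen, _⟩ := hpre
  unfold D_solution at hD
  match progresses, hD with
  | [p], _ =>
    match speeds, hlen with
    | s :: stl, _ =>
      show solution [p] (s :: stl) ≠ solution_alt [p] (s :: stl)
      unfold solution solution_alt
      simp [List.range_succ, PySem.List.enumerate, solStepA]
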